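-- pv_equiv track=rewrite | github.com/lukeflima/Advent-of-Code | 2025/python/day06/main.py | part1
-- ===== SOURCE A (Python) =====
-- import functools
-- import operator
--
-- def part1(input: str) -> str:
--     lines = input.rstrip().split("\n")
--     operands = lines[-1].split()
--     nums = [list(map(int, line.split())) for line in lines[:-1]]
--
--     res = 0
--     for i, op in enumerate(operands):
--         if op == "+":
--             res += sum(num_row[i] for num_row in nums)
--         if op == "*":
--             res += functools.reduce(operator.mul, (num_row[i] for num_row in nums), 1)
--
--     return str(res)
-- ===== SOURCE B (Python) =====
-- def part1(input: str) -> str: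
--     lines = input.rstrip().split("\n")
--     ops = lines[-1].split()
--     known = [(i, op) for i, op in enumerate(ops) if op in ("+", "*")]
--     acc = [0 if op == "+" else 1 for _, op in known]
--     for line in lines[:-1]:
--         row = [int(x) for x in line.split()]
--         acc = [a + row[i] if op == "+" else a * row[i]
--                for (i, op), a in zip(known, acc)]
--     return str(sum(acc))
-- ===== Notes on version B (the rewrite author's own statement) =====
-- stated objective: alternative
-- what changed: B replaces A's column-major re-scan of all rows per operator with a single row-major pass that keeps one running accumulator per '+'/'*' column (0 or 1 seeded by the operator), updating every accumulator while each row is parsed once, then sums the accumulators.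
import Mathlib
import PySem

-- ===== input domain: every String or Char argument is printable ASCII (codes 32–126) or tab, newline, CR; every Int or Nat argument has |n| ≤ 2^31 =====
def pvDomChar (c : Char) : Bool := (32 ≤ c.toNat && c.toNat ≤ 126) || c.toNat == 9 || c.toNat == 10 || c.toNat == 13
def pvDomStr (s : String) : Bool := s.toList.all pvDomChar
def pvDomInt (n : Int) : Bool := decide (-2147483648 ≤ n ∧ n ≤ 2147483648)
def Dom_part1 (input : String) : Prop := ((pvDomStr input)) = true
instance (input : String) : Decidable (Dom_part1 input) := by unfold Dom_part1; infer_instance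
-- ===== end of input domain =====

-- B changes the traversal: one row-major pass keeping a running accumulator per '+'/'*' column,
-- instead of A's per-operator re-scan of all rows (objective: alternative, same cost).

-- ===== PORT A =====
-- int(t) and row[i] can raise in Python; Pre_part1 excludes exactly those inputs, so the
-- .getD defaults below are never reached on admitted inputs.
def part1 (input : String) : String :=
  let lines := (PySem.Str.split? (PySem.Str.rstrip input) "\n").getD []  -- sep "\n" ≠ "" so split? is some
  let operands := PySem.Str.split₀ (PySem.List.pyGetD lines (-1) "")    -- lines is never [], so lines[-1] is safe
  let nums := (PySem.List.slice lines none (some (-1))).map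
      (fun line => (PySem.Str.split₀ line).map (fun t => (PySem.Int.ofStr? t).getD 0))
  let res := (PySem.List.enumerate operands).foldl
      (fun res p =>
        let res := if p.2 = "+" then
            res + nums.foldl (fun a row => a + PySem.List.pyGetD row p.1 0) 0 else res
        if p.2 = "*" then
            res + nums.foldl (fun a row => a * PySem.List.pyGetD row p.1 0) 1 else res)
      (0 : Int)
  PySem.Int.toStr res

-- ===== PORT B =====
def part1_alt (input : String) : String :=
  let lines := (PySem.Str.split? (PySem.Str.rstrip input) "\n").getD []
  let ops := PySem.Str.split₀ (PySem.List.pyGetD lines (-1) "")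
  let known := (PySem.List.enumerate ops).filter (fun p => p.2 == "+" || p.2 == "*")
  let acc0 := known.map (fun p => if p.2 = "+" then (0 : Int) else 1)
  let acc := (PySem.List.slice lines none (some (-1))).foldl
      (fun acc line =>
        let row := (PySem.Str.split₀ line).map (fun t => (PySem.Int.ofStr? t).getD 0)
        (known.zip acc).map (fun q =>
          if q.1.2 = "+" then q.2 + PySem.List.pyGetD row q.1.1 0
          else q.2 * PySem.List.pyGetD row q.1.1 0))
      acc0
  PySem.Int.toStr (acc.foldl (· + ·) 0)

-- ===== PRECONDITION & SPEC =====
-- Pre_ excludes exactly the inputs on which Python A raises: a token of a numeric row that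
-- int() rejects (ValueError), or a '+'/'*' operator whose column index is out of range for
-- some numeric row (IndexError).
def Pre_part1 (input : String) : Prop :=
  let lines := (PySem.Str.split? (PySem.Str.rstrip input) "\n").getD []
  let ops := PySem.Str.split₀ (PySem.List.pyGetD lines (-1) "")
  let rows := (PySem.List.slice lines none (some (-1))).map PySem.Str.split₀
  (∀ row ∈ rows, ∀ tok ∈ row, (PySem.Int.ofStr? tok).isSome) ∧
  (∀ p ∈ PySem.List.enumerate ops, (p.2 = "+" ∨ p.2 = "*") →
      ∀ row ∈ rows, p.1 < (row.length : Int))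
instance (input : String) : Decidable (Pre_part1 input) := by unfold Pre_part1; infer_instance

def pvWitness_part1 : String := "1 2\n3 4\n+ *"

def Spec_part1 (input : String) (out : String) : Prop := out = part1_alt input
instance (input : String) (out : String) : Decidable (Spec_part1 input out) := by unfold Spec_part1; infer_instance

-- ===== CLAIM (what is proved, stated in full; the proofs are below) =====
def Claim_equal_part1 : Prop := ∀ (input : String), Dom_part1 input → Pre_part1 input → Spec_part1 input (part1 input)

-- ===== LEMMAS AND PROOFS =====

-- the shared pipeline, named for the proofs (same terms as in the ports)
def pvParseRow (line : String) : List Int :=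
  (PySem.Str.split₀ line).map (fun t => (PySem.Int.ofStr? t).getD 0)

def pvKnown (ops : List String) : List (Int × String) :=
  (PySem.List.enumerate ops).filter (fun p => p.2 == "+" || p.2 == "*")

-- A's two sequential ifs add exactly this per-operator contribution.
def pvContrib (ls : List String) (p : Int × String) : Int :=
  (if p.2 = "+" then
      (ls.map pvParseRow).foldl (fun a row => a + PySem.List.pyGetD row p.1 0) 0 else 0) +
  (if p.2 = "*" then
      (ls.map pvParseRow).foldl (fun a row => a * PySem.List.pyGetD row p.1 0) 1 else 0)

theorem sum_map_filter_of_zero {α : Type} (p : α → Bool) (f : α → Int) :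
    ∀ (l : List α), (∀ x ∈ l, p x = false → f x = 0) →
      (l.map f).sum = ((l.filter p).map f).sum := by
  intro l
  induction l with
  | nil => intro _; rfl
  | cons x t ih =>
    intro h
    by_cases hp : p x = true
    · simp [hp, ih (fun y hy => h y (List.mem_cons_of_mem _ hy))]
    · have hx : f x = 0 := h x (List.mem_cons_self) (by simpa using hp)
      simp [hp, hx, ih (fun y hy => h y (List.mem_cons_of_mem _ hy))]

theorem zip_map_self {α β : Type} (g : α → β) :
    ∀ (l : List α), l.zip (l.map g) = l.map (fun x => (x, g x)) := by
  intro l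
  induction l with
  | nil => rfl
  | cons x t ih => simpa [List.zip] using ih

-- B's row-major fold computed columnwise: folding rows over a list of per-column
-- accumulators equals, per column, folding that column's update over the rows.
theorem b_fold_columns {R : Type} (known : List (Int × String))
    (upd : (Int × String) → Int → R → Int) :
    ∀ (rows : List R) (g : (Int × String) → Int),
      rows.foldl
        (fun acc row => (known.zip acc).map (fun q => upd q.1 q.2 row))
        (known.map g)
      = known.map (fun q => rows.foldl (upd q) (g q)) := by
  intro rows
  induction rows with
  | nil => intro g; rfl
  | cons r t ih =>
    intro g
    have h1 : (known.zip (known.map g)).map (fun q => upd q.1 q.2 r)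
        = known.map (fun q => upd q (g q) r) := by
      rw [zip_map_self]; simp
    simp only [List.foldl_cons, h1]
    exact ih (fun q => upd q (g q) r)

-- per-column value of B's row-major fold equals A's contribution, for kept operators
theorem col_value (ls : List String) (q : Int × String)
    (hq : q.2 = "+" ∨ q.2 = "*") :
    ls.foldl
      (fun a line =>
        if q.2 = "+" then a + PySem.List.pyGetD (pvParseRow line) q.1 0
        else a * PySem.List.pyGetD (pvParseRow line) q.1 0)
      (if q.2 = "+" then (0 : Int) else 1)
    = pvContrib ls q := by
  rcases hq with h | h
  · unfold pvContrib
    rw [h]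
    simp only [String.reduceEq, reduceIte, add_zero]
    rw [List.foldl_map]
  · unfold pvContrib
    rw [h]
    simp only [String.reduceEq, reduceIte, zero_add]
    rw [List.foldl_map]

-- the Int-level equality with the operator tokens and the numeric lines generalized
theorem core_int (ops : List String) (ls : List String) :
    (PySem.List.enumerate ops).foldl
      (fun res p =>
        let res := if p.2 = "+" then
            res + (ls.map pvParseRow).foldl (fun a row => a + PySem.List.pyGetD row p.1 0) 0
          else res
        if p.2 = "*" then
            res + (ls.map pvParseRow).foldl (fun a row => a * PySem.List.pyGetD row p.1 0) 1
          else res)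
      (0 : Int)
    = (ls.foldl
        (fun acc line =>
          ((pvKnown ops).zip acc).map (fun q =>
            if q.1.2 = "+" then q.2 + PySem.List.pyGetD (pvParseRow line) q.1.1 0
            else q.2 * PySem.List.pyGetD (pvParseRow line) q.1.1 0))
        ((pvKnown ops).map (fun p => if p.2 = "+" then (0 : Int) else 1))).foldl (· + ·) 0 := by
  -- A side: the foldl adds pvContrib for each enumerated operator
  have hA : (PySem.List.enumerate ops).foldl
      (fun res p =>
        let res := if p.2 = "+" then
            res + (ls.map pvParseRow).foldl (fun a row => a + PySem.List.pyGetD row p.1 0) 0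
          else res
        if p.2 = "*" then
            res + (ls.map pvParseRow).foldl (fun a row => a * PySem.List.pyGetD row p.1 0) 1
          else res)
      (0 : Int)
      = ((PySem.List.enumerate ops).map (pvContrib ls)).sum := by
    rw [PySem.List.foldl_congr_mem (PySem.List.enumerate ops) _
        (fun acc x => acc + pvContrib ls x) 0
        (by
          intro res p _
          by_cases h1 : p.2 = "+"
          · simp [pvContrib, h1]
          · by_cases h2 : p.2 = "*" <;> simp [pvContrib, h1, h2]),
      PySem.List.foldl_add, zero_add]
  rw [hA]
  -- B side: compute the fold columnwise, then each column equals A's contribution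
  rw [b_fold_columns (pvKnown ops)
      (fun q a line =>
        if q.2 = "+" then a + PySem.List.pyGetD (pvParseRow line) q.1 0
        else a * PySem.List.pyGetD (pvParseRow line) q.1 0)
      ls (fun p => if p.2 = "+" then (0 : Int) else 1)]
  have hsum : ∀ (l : List Int), l.foldl (· + ·) 0 = l.sum := by
    intro l; simpa using PySem.List.foldl_add l id 0
  rw [hsum]
  have hcols : (pvKnown ops).map
      (fun q => ls.foldl
        (fun a line =>
          if q.2 = "+" then a + PySem.List.pyGetD (pvParseRow line) q.1 0
          else a * PySem.List.pyGetD (pvParseRow line) q.1 0)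
        (if q.2 = "+" then (0 : Int) else 1))
      = (pvKnown ops).map (pvContrib ls) := by
    apply List.map_congr_left
    intro q hq
    apply col_value
    have := (List.mem_filter.mp hq).2
    simpa using this
  rw [hcols]
  unfold pvKnown
  exact (sum_map_filter_of_zero (fun q => q.2 == "+" || q.2 == "*") (pvContrib ls) (PySem.List.enumerate ops)
    (by
      intro p _ hp
      simp at hp
      simp [pvContrib, hp.1, hp.2]))

-- ===== VERDICT (by name: the statement is the Claim_ definition above) =====
theorem part1_spec : Claim_equal_part1 := by
  intro input _ _
  exact congrArg PySem.Int.toStr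
    (core_int
      (PySem.Str.split₀ (PySem.List.pyGetD
        ((PySem.Str.split? (PySem.Str.rstrip input) "\n").getD []) (-1) ""))
      (PySem.List.slice ((PySem.Str.split? (PySem.Str.rstrip input) "\n").getD []) none (some (-1))))
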